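-- pv_equiv track=rewrite | github.com/Henrique-zoo/APC | Nível 2/3054 - MatrizSuperLegal.py | matrizSuperLegal
-- ===== SOURCE A (Python) =====
-- def condicao(matriz, i, j):
--     return matriz[0][0] + matriz[i][j] <= matriz[0][j] + matriz[i][0]
--
-- def matrizSuperLegal(matriz):
--     linhas, colunas = len(matriz), len(matriz[0])
--     maximo = 0
--
--     for i in range(1, linhas):
--         for j in range(1, colunas):
--             if condicao(matriz, i, j):
--                 matriz[i][j] += matriz[i-1][j-1]
--                 maximo = max(maximo, matriz[i][j])
--
--     return maximo
-- ===== SOURCE B (Python) =====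
-- def matrizSuperLegal(matriz):
--     # Pure recursive re-implementation: no in-place mutation (A rewrites matriz;
--     # equivalence is about the return value only).
--     linhas, colunas = len(matriz), len(matriz[0])
--
--     def val(i, j):
--         # final value of cell (i, j) after the cascading diagonal accumulation
--         if i <= 0 or j <= 0:
--             return matriz[i][j]
--         if matriz[0][0] + matriz[i][j] <= matriz[0][j] + matriz[i][0]:
--             return matriz[i][j] + val(i - 1, j - 1)
--         return matriz[i][j]
--
--     return max([0] + [val(i, j)
--                       for i in range(1, linhas)
--                       for j in range(1, colunas)
--                       if matriz[0][0] + matriz[i][j] <= matriz[0][j] + matriz[i][0]])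
-- ===== Notes on version B (the rewrite author's own statement) =====
-- stated objective: alternative
-- what changed: A fills the matrix in place with nested row/column loops while tracking a running max; B defines the final value of each cell by a pure recursion along its diagonal and takes one max over a comprehension, with no mutation and no loop state.
import Mathlib
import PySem

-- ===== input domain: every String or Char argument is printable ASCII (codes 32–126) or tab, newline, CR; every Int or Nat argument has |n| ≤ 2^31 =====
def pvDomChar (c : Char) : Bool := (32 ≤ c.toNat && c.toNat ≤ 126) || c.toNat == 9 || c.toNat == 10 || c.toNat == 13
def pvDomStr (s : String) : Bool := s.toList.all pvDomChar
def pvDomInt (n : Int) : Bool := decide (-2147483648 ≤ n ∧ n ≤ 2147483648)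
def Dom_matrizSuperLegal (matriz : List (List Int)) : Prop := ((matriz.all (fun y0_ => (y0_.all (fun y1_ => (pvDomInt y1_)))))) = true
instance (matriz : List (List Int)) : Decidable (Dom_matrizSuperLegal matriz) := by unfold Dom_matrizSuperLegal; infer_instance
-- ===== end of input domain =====

-- B replaces A's in-place dynamic programming (nested loops mutating the matrix and a running max)
-- by a pure recursive cell-value function and one max over a comprehension; A mutates its argument,
-- B does not — the equivalence proved here is about the RETURN value only. Objective: alternative.

-- ===== PORT A =====
def condicao (matriz : List (List Int)) (i j : Int) : Bool :=
  decide (PySem.List.pyGetD (PySem.List.pyGetD matriz 0 []) 0 0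
            + PySem.List.pyGetD (PySem.List.pyGetD matriz i []) j 0
          ≤ PySem.List.pyGetD (PySem.List.pyGetD matriz 0 []) j 0
            + PySem.List.pyGetD (PySem.List.pyGetD matriz i []) 0 0)

def matrizSuperLegal (matriz : List (List Int)) : Int :=
  let linhas : Int := matriz.length
  let colunas : Int := (PySem.List.pyGetD matriz 0 []).length
  ((PySem.List.pyRange 1 linhas 1).foldl (fun st i =>
    (PySem.List.pyRange 1 colunas 1).foldl (fun st j =>
      if condicao st.1 i j then
        let v := PySem.List.pyGetD (PySem.List.pyGetD st.1 i []) j 0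
                  + PySem.List.pyGetD (PySem.List.pyGetD st.1 (i-1) []) (j-1) 0
        (PySem.List.pySetD st.1 i (PySem.List.pySetD (PySem.List.pyGetD st.1 i []) j v), max st.2 v)
      else st) st) (matriz, (0 : Int))).2

-- ===== PORT B =====
def valOf (matriz : List (List Int)) (i j : Int) : Int :=
  if i ≤ 0 ∨ j ≤ 0 then PySem.List.pyGetD (PySem.List.pyGetD matriz i []) j 0
  else if PySem.List.pyGetD (PySem.List.pyGetD matriz 0 []) 0 0
            + PySem.List.pyGetD (PySem.List.pyGetD matriz i []) j 0
          ≤ PySem.List.pyGetD (PySem.List.pyGetD matriz 0 []) j 0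
            + PySem.List.pyGetD (PySem.List.pyGetD matriz i []) 0 0 then
    PySem.List.pyGetD (PySem.List.pyGetD matriz i []) j 0 + valOf matriz (i-1) (j-1)
  else PySem.List.pyGetD (PySem.List.pyGetD matriz i []) j 0
termination_by i.toNat
decreasing_by omega

def matrizSuperLegal_alt (matriz : List (List Int)) : Int :=
  let linhas : Int := matriz.length
  let colunas : Int := (PySem.List.pyGetD matriz 0 []).length
  ((PySem.List.pyRange 1 linhas 1).flatMap (fun i =>
    ((PySem.List.pyRange 1 colunas 1).filter (fun j =>
      decide (PySem.List.pyGetD (PySem.List.pyGetD matriz 0 []) 0 0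
                + PySem.List.pyGetD (PySem.List.pyGetD matriz i []) j 0
              ≤ PySem.List.pyGetD (PySem.List.pyGetD matriz 0 []) j 0
                + PySem.List.pyGetD (PySem.List.pyGetD matriz i []) 0 0))).map
      (fun j => valOf matriz i j))).foldl max 0

-- ===== PRECONDITION & SPEC =====
-- Pre_ excludes exactly the inputs where the Python A raises IndexError: the empty matrix, and
-- (when there are at least 2 rows and the first row has at least 2 columns) a later row shorter
-- than the first; B raises on the very same inputs.
def Pre_matrizSuperLegal (matriz : List (List Int)) : Prop :=
  matriz ≠ [] ∧ (2 ≤ matriz.length → 2 ≤ (matriz.getD 0 []).length →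
    ∀ row ∈ matriz, (matriz.getD 0 []).length ≤ row.length)
instance (matriz : List (List Int)) : Decidable (Pre_matrizSuperLegal matriz) := by
  unfold Pre_matrizSuperLegal; infer_instance

def pvWitness_matrizSuperLegal : List (List Int) := [[1, 2], [3, 4]]

def Spec_matrizSuperLegal (matriz : List (List Int)) (out : Int) : Prop := out = matrizSuperLegal_alt matriz
instance (matriz : List (List Int)) (out : Int) : Decidable (Spec_matrizSuperLegal matriz out) := by
  unfold Spec_matrizSuperLegal; infer_instance

-- ===== CLAIM (what is proved, stated in full; the proofs are below) =====
def Claim_equal_matrizSuperLegal : Prop := ∀ (matriz : List (List Int)), Dom_matrizSuperLegal matriz → Pre_matrizSuperLegal matriz → Spec_matrizSuperLegal matriz (matrizSuperLegal matriz)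

-- ===== LEMMAS AND PROOFS =====

-- Nat-indexed reading of a matrix cell (default 0, exactly what the ports' pyGetD computes on cast indices)
def gN (m : List (List Int)) (a b : Nat) : Int := (m.getD a []).getD b 0

-- the (purely original-matrix) condition of `condicao`
def condB (m : List (List Int)) (a b : Nat) : Bool :=
  decide (gN m 0 0 + gN m a b ≤ gN m 0 b + gN m a 0)

-- final value of cell (a,b) after A's cascading in-place pass (Nat-indexed twin of valOf)
def vN (m : List (List Int)) : Nat → Nat → Int
  | 0, b => gN m 0 b
  | a+1, 0 => gN m (a+1) 0
  | a+1, b+1 => if condB m (a+1) (b+1) then gN m (a+1) (b+1) + vN m a b else gN m (a+1) (b+1)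

-- the values A's running max has seen after processing columns 1..n of row i (in order)
def rowList (m : List (List Int)) (i : Nat) (n : Nat) : List Int :=
  ((List.range n).filter (fun k => condB m i (1+k))).map (fun k => vN m i (1+k))

-- ... after fully processing rows 1..r (n = colunas-1)
def allList (m : List (List Int)) (r : Nat) (n : Nat) : List Int :=
  (List.range r).flatMap (fun a => rowList m (1+a) n)

-- A's inner-loop body, named (definitionally the lambda in the port)
def cellStep (i : Int) (st : List (List Int) × Int) (j : Int) : List (List Int) × Int :=
  if condicao st.1 i j then
    (PySem.List.pySetD st.1 i (PySem.List.pySetD (PySem.List.pyGetD st.1 i []) j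
        (PySem.List.pyGetD (PySem.List.pyGetD st.1 i []) j 0
          + PySem.List.pyGetD (PySem.List.pyGetD st.1 (i-1) []) (j-1) 0)),
     max st.2 (PySem.List.pyGetD (PySem.List.pyGetD st.1 i []) j 0
          + PySem.List.pyGetD (PySem.List.pyGetD st.1 (i-1) []) (j-1) 0))
  else st

-- loop-state invariants: shape preserved; cells processed before (i,j) hold their final value vN
def ShapeOK (m m' : List (List Int)) : Prop :=
  m'.length = m.length ∧ ∀ a : Nat, (m'.getD a []).length = (m.getD a []).length

def ValsOK (m m' : List (List Int)) (C : Nat) (i j : Nat) : Prop :=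
  ∀ a b : Nat, gN m' a b =
    if 1 ≤ a ∧ 1 ≤ b ∧ b < C ∧ (a < i ∨ (a = i ∧ b < j)) then vN m a b else gN m a b

lemma pyGetD_gN (m : List (List Int)) (a b : Nat) :
    PySem.List.pyGetD (PySem.List.pyGetD m (a : Int) []) (b : Int) 0 = gN m a b := by
  simp [gN]

lemma condicao_eq (m : List (List Int)) (a b : Nat) :
    condicao m (a : Int) (b : Int) = condB m a b := by
  simp only [condicao, condB, PySem.List.pyGetD_natCast, PySem.List.pyGetD_zero, gN]
  rfl

lemma g00 (m : List (List Int)) :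
    PySem.List.pyGetD (PySem.List.pyGetD m 0 []) 0 0 = gN m 0 0 := by
  simp [gN, PySem.List.pyGetD_zero]

lemma g0b (m : List (List Int)) (b : Nat) :
    PySem.List.pyGetD (PySem.List.pyGetD m 0 []) (b : Int) 0 = gN m 0 b := by
  simp [gN, PySem.List.pyGetD_zero]

lemma ga0 (m : List (List Int)) (a : Nat) :
    PySem.List.pyGetD (PySem.List.pyGetD m (a : Int) []) 0 0 = gN m a 0 := by
  simp [gN, PySem.List.pyGetD_zero]

lemma valOf_eq (m : List (List Int)) (a b : Nat) : valOf m (a : Int) (b : Int) = vN m a b := by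
  induction a generalizing b with
  | zero =>
    rw [valOf, if_pos (Or.inl (by simp)), pyGetD_gN]
    rfl
  | succ a ih =>
    cases b with
    | zero =>
      rw [valOf, if_pos (Or.inr (by simp)), pyGetD_gN]
      rfl
    | succ b =>
      have h1 : ¬ (((a+1 : Nat) : Int) ≤ 0 ∨ ((b+1 : Nat) : Int) ≤ 0) := by push_cast; omega
      have h2 : ((a+1 : Nat) : Int) - 1 = (a : Int) := by push_cast; ring
      have h3 : ((b+1 : Nat) : Int) - 1 = (b : Int) := by push_cast; ring
      rw [valOf, if_neg h1, h2, h3, ih b, g00, pyGetD_gN, g0b, ga0]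
      conv_rhs => rw [vN]
      simp [condB]

lemma vN_of_not_cond (m : List (List Int)) (a b : Nat)
    (h : condB m a b = false) : vN m a b = gN m a b := by
  match a, b with
  | 0, b => rfl
  | a+1, 0 => rfl
  | a+1, b+1 => simp [vN, h]

lemma vN_base (m : List (List Int)) (a b : Nat) (h : a = 0 ∨ b = 0) :
    vN m a b = gN m a b := by
  match a, b with
  | 0, b => rfl
  | a+1, 0 => rfl
  | a+1, b+1 => omega

lemma getD_set_row (m' : List (List Int)) (i : Nat) (hi : i < m'.length)
    (r : List Int) (a : Nat) :
    (m'.set i r).getD a [] = if a = i then r else m'.getD a [] := by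
  by_cases h : a = i
  · subst h
    simp [List.getD_eq_getElem?_getD, List.getElem?_set_self hi]
  · simp [List.getD_eq_getElem?_getD, List.getElem?_set_ne (by omega : i ≠ a), h]

lemma gN_set (m' : List (List Int)) (i j : Nat) (hi : i < m'.length)
    (hj : j < (m'.getD i []).length) (v : Int) (a b : Nat) :
    gN (m'.set i ((m'.getD i []).set j v)) a b = if a = i ∧ b = j then v else gN m' a b := by
  unfold gN
  rw [getD_set_row m' i hi]
  by_cases ha : a = i
  · rw [if_pos ha]
    by_cases hb : b = j
    · rw [if_pos ⟨ha, hb⟩, hb]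
      simp [List.getD_eq_getElem?_getD,
        List.getElem?_set_self (show j < (m'[i]?.getD ([] : List Int)).length by
          simpa [List.getD_eq_getElem?_getD] using hj)]
    · rw [if_neg (by tauto), ha]
      simp [List.getD_eq_getElem?_getD, List.getElem?_set_ne (show j ≠ b from fun h => hb h.symm)]
  · rw [if_neg ha, if_neg (by tauto)]

lemma cellStep_spec (m m' : List (List Int)) (mx : Int) (C i n : Nat)
    (hi1 : 1 ≤ i) (hiL : i < m.length) (hn : 1 + n < C)
    (hLen : C ≤ (m.getD i []).length)
    (hS : ShapeOK m m') (hV : ValsOK m m' C i (1+n)) :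
    ShapeOK m (cellStep (i : Int) (m', mx) ((1+n : Nat) : Int)).1 ∧
    ValsOK m (cellStep (i : Int) (m', mx) ((1+n : Nat) : Int)).1 C i (1+n+1) ∧
    (cellStep (i : Int) (m', mx) ((1+n : Nat) : Int)).2
      = (if condB m i (1+n) then max mx (vN m i (1+n)) else mx) := by
  obtain ⟨hSL, hSR⟩ := hS
  have e1 : gN m' 0 0 = gN m 0 0 := (hV 0 0).trans (if_neg (by omega))
  have e2 : gN m' i (1+n) = gN m i (1+n) := (hV i (1+n)).trans (if_neg (by omega))
  have e3 : gN m' 0 (1+n) = gN m 0 (1+n) := (hV 0 (1+n)).trans (if_neg (by omega))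
  have e4 : gN m' i 0 = gN m i 0 := (hV i 0).trans (if_neg (by omega))
  have hcond : condicao m' (i : Int) ((1+n : Nat) : Int) = condB m i (1+n) := by
    rw [condicao_eq]
    simp only [condB, e1, e2, e3, e4]
  have hrec : gN m' (i-1) n = vN m (i-1) n := by
    rw [hV (i-1) n]
    split_ifs with h
    · rfl
    · exact (vN_base m (i-1) n (by omega)).symm
  have hi' : ((i : Int) - 1) = ((i - 1 : Nat) : Int) := by omega
  have hn' : (((1+n : Nat) : Int) - 1) = ((n : Nat) : Int) := by push_cast; ring
  have hv : PySem.List.pyGetD (PySem.List.pyGetD m' (i : Int) []) ((1+n : Nat) : Int) 0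
      + PySem.List.pyGetD (PySem.List.pyGetD m' ((i : Int) - 1) []) (((1+n : Nat) : Int) - 1) 0
      = (if condB m i (1+n) = true then vN m i (1+n) else gN m i (1+n) + vN m (i-1) n) := by
    rw [hi', hn', pyGetD_gN, pyGetD_gN, e2, hrec]
    by_cases hc : condB m i (1+n) = true
    · rw [if_pos hc]
      have hieq : i = (i - 1) + 1 := by omega
      have hneq : 1 + n = n + 1 := by omega
      rw [hieq, hneq] at hc ⊢
      rw [vN, if_pos hc, ← hieq]
    · rw [if_neg hc]
  by_cases hc : condB m i (1+n) = true
  · have hstep : cellStep (i : Int) (m', mx) ((1+n : Nat) : Int)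
        = (m'.set i ((m'.getD i []).set (1+n) (vN m i (1+n))), max mx (vN m i (1+n))) := by
      rw [cellStep]
      simp only [hcond, hc, if_true]
      rw [hv, if_pos hc, PySem.List.pyGetD_natCast, PySem.List.pySetD_natCast,
        PySem.List.pySetD_natCast]
    rw [hstep]
    have hiL' : i < m'.length := by omega
    have hjL : 1 + n < (m'.getD i []).length := by rw [hSR i]; omega
    refine ⟨⟨by simp [hSL], ?_⟩, ?_, by simp [hc]⟩
    · intro a
      rw [getD_set_row m' i hiL']
      split_ifs with h
      · rw [h]
        simpa [List.getD_eq_getElem?_getD] using hSR i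
      · exact hSR a
    · intro a b
      rw [gN_set m' i (1+n) hiL' hjL _ a b, hV a b]
      by_cases hab : a = i ∧ b = 1 + n
      · rw [if_pos hab, if_pos (by omega), hab.1, hab.2]
      · rw [if_neg hab]
        exact if_congr (by omega) rfl rfl
  · have hstep : cellStep (i : Int) (m', mx) ((1+n : Nat) : Int) = (m', mx) := by
      rw [cellStep, hcond, if_neg hc]
    rw [hstep]
    refine ⟨⟨hSL, hSR⟩, ?_, by simp [hc]⟩
    intro a b
    rw [hV a b]
    by_cases hab : a = i ∧ b = 1 + n
    · rw [if_neg (by omega), if_pos (by omega)]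
      obtain ⟨ha, hb⟩ := hab
      rw [ha, hb]
      exact (vN_of_not_cond m i (1+n) ((Bool.not_eq_true _).mp hc)).symm
    · exact if_congr (by omega) rfl rfl

-- the Int index list [1, 2, …, n] the loops traverse
def idxList (n : Nat) : List Int := (List.range n).map (fun k : Nat => ((1 : Int) + (k : Int)))

lemma idxList_succ (n : Nat) : idxList (n+1) = idxList n ++ [((1 : Int) + (n : Int))] := by
  unfold idxList
  rw [List.range_succ]
  simp

lemma rowList_succ (m : List (List Int)) (i n : Nat) :
    rowList m i (n+1)
      = rowList m i n ++ (if condB m i (1+n) then [vN m i (1+n)] else []) := by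
  unfold rowList
  rw [List.range_succ, List.filter_append, List.map_append]
  by_cases h : condB m i (1+n) <;> simp [h]

lemma inner_fold (m : List (List Int)) (C : Nat)
    (i : Nat) (hi1 : 1 ≤ i) (hiL : i < m.length) (hLen : C ≤ (m.getD i []).length) :
    ∀ n, n ≤ C - 1 → ∀ (m' : List (List Int)) (mx : Int),
      ShapeOK m m' → ValsOK m m' C i 1 →
      ShapeOK m ((idxList n).foldl (cellStep (i : Int)) (m', mx)).1 ∧
      ValsOK m ((idxList n).foldl (cellStep (i : Int)) (m', mx)).1 C i (1+n) ∧
      ((idxList n).foldl (cellStep (i : Int)) (m', mx)).2 = (rowList m i n).foldl max mx := by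
  intro n
  induction n with
  | zero =>
    intro _ m' mx hS hV
    simpa [rowList, idxList] using ⟨hS, hV⟩
  | succ n ih =>
    intro hn m' mx hS hV
    have hn' : n ≤ C - 1 := by omega
    have hnC : 1 + n < C := by omega
    obtain ⟨ihS, ihV, ihmx⟩ := ih hn' m' mx hS hV
    rw [idxList_succ, List.foldl_append]
    set st := (idxList n).foldl (cellStep (i : Int)) (m', mx) with hst
    have hcast : ((1 : Int) + (n : Int)) = ((1 + n : Nat) : Int) := by push_cast; ring
    have hspec := cellStep_spec m st.1 st.2 C i n hi1 hiL hnC hLen ihS ihV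
    rw [List.foldl_cons, List.foldl_nil, hcast]
    refine ⟨hspec.1, ?_, ?_⟩
    · have : 1 + (n + 1) = 1 + n + 1 := by omega
      rw [this]
      exact hspec.2.1
    · rw [hspec.2.2, ihmx, rowList_succ]
      by_cases h : condB m i (1+n) <;> simp [h, List.foldl_append]

lemma valsOK_next (m m' : List (List Int)) (C i : Nat)
    (h : ValsOK m m' C i (1+(C-1))) : ValsOK m m' C (i+1) 1 := by
  intro a b
  rw [h a b]
  exact if_congr (by omega) rfl rfl

lemma allList_succ (m : List (List Int)) (r n : Nat) :
    allList m (r+1) n = allList m r n ++ rowList m (1+r) n := by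
  unfold allList
  rw [List.range_succ, List.flatMap_append]
  simp

lemma pyRange_inner (C : Nat) :
    PySem.List.pyRange 1 (C : Int) 1
      = idxList (C-1) := by
  rw [PySem.List.pyRange_one]
  have h : ((C : Int) - 1).toNat = C - 1 := by omega
  rw [h]
  simp [idxList]

lemma outer_fold (m : List (List Int)) (C : Nat)
    (hRect : ∀ a : Nat, a < m.length → C ≤ (m.getD a []).length) :
    ∀ r, r ≤ m.length - 1 →
      ShapeOK m ((idxList r).foldl
          (fun st i => (idxList (C-1)).foldl (cellStep i) st) (m, 0)).1 ∧
      ValsOK m ((idxList r).foldl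
          (fun st i => (idxList (C-1)).foldl (cellStep i) st) (m, 0)).1 C (1+r) 1 ∧
      ((idxList r).foldl
          (fun st i => (idxList (C-1)).foldl (cellStep i) st) (m, 0)).2
        = (allList m r (C-1)).foldl max 0 := by
  intro r
  induction r with
  | zero =>
    intro _
    simp only [idxList, List.range_zero, List.map_nil, List.foldl_nil]
    refine ⟨⟨rfl, fun a => rfl⟩, ?_, by simp [allList]⟩
    intro a b
    rw [if_neg (by omega)]
  | succ r ih =>
    intro hr
    have hr' : r ≤ m.length - 1 := by omega
    obtain ⟨ihS, ihV, ihmx⟩ := ih hr'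
    rw [idxList_succ, List.foldl_append]
    set st := (idxList r).foldl
        (fun st i => (idxList (C-1)).foldl (cellStep i) st) (m, 0) with hst
    have hi1 : 1 ≤ 1 + r := by omega
    have hiL : 1 + r < m.length := by omega
    have hcast : ((1 : Int) + (r : Int)) = ((1 + r : Nat) : Int) := by push_cast; ring
    have hV1 : ValsOK m st.1 C (1+r) 1 := ihV
    have hinner := inner_fold m C (1+r) hi1 hiL (hRect _ hiL) (C-1) le_rfl st.1 st.2 ihS hV1
    rw [List.foldl_cons, List.foldl_nil, hcast]
    refine ⟨hinner.1, ?_, ?_⟩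
    · have : 1 + (r + 1) = (1 + r) + 1 := by omega
      rw [this]
      exact valsOK_next m _ C (1+r) hinner.2.1
    · rw [hinner.2.2, ihmx, allList_succ, List.foldl_append]

lemma idx_cast (k : Nat) : ((1 : Int) + (k : Int)) = ((1 + k : Nat) : Int) := by
  push_cast; ring

lemma alt_eq (m : List (List Int)) :
    matrizSuperLegal_alt m
      = (allList m (m.length - 1) ((m.getD 0 []).length - 1)).foldl max 0 := by
  unfold matrizSuperLegal_alt
  rw [PySem.List.pyGetD_zero]
  simp only [pyRange_inner]
  congr 1
  unfold idxList allList
  rw [List.flatMap_map]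
  apply List.flatMap_congr
  intro k1 _
  rw [List.filter_map, List.map_map, rowList]
  congr 1
  · funext k
    simp only [Function.comp_apply, idx_cast k1, idx_cast k, valOf_eq]
  · apply List.filter_congr
    intro k _
    simp only [Function.comp_apply, idx_cast k1, idx_cast k, condB, gN,
      PySem.List.pyGetD_natCast, PySem.List.pyGetD_zero]
    rfl

theorem matrizSuperLegal_spec : Claim_equal_matrizSuperLegal := by
  intro m _ hPre
  obtain ⟨hne, hrect⟩ := hPre
  unfold Spec_matrizSuperLegal
  rw [alt_eq]
  show ((PySem.List.pyRange 1 (m.length : Int) 1).foldl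
      (fun st i => (PySem.List.pyRange 1 (((PySem.List.pyGetD m 0 []).length : Nat) : Int) 1).foldl
        (cellStep i) st) (m, (0 : Int))).2 = _
  rw [PySem.List.pyGetD_zero]
  simp only [pyRange_inner]
  by_cases hL : 2 ≤ m.length
  · by_cases hC : 2 ≤ (m.getD 0 []).length
    · have hRect : ∀ a : Nat, a < m.length → (m.getD 0 []).length ≤ (m.getD a []).length := by
        intro a ha
        refine hrect hL hC _ ?_
        rw [List.getD_eq_getElem?_getD, List.getElem?_eq_getElem ha]
        exact List.getElem_mem ha
      have h := outer_fold m ((m.getD 0 []).length) hRect (m.length - 1) le_rfl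
      exact h.2.2
    · have hC1 : (m.getD 0 []).length - 1 = 0 := by omega
      rw [hC1]
      simp only [idxList, List.range_zero, List.map_nil, List.foldl_nil]
      rw [PySem.List.foldl_ignore]
      simp only [allList, rowList, List.range_zero, List.filter_nil, List.map_nil]
      have h0 : List.flatMap (fun _ : Nat => ([] : List Int)) (List.range (m.length - 1)) = [] := by
        simp
      rw [h0]
      rfl
  · have hL1 : m.length - 1 = 0 := by omega
    rw [hL1]
    simp [idxList, allList]
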